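-- pv_equiv track=rewrite | github.com/FuriLabs/store-provider | open_store/click.py | find_compatible_download
-- ===== SOURCE A (Python) =====
-- def find_compatible_download(downloads, system_arch, prefer_focal=True):
--     """
--     Find the best download option based on architecture and channel preferences.
--
--     Args:
--         downloads: List of download options
--         system_arch: Current system architecture
--         prefer_focal: Whether to prefer focal channel
--
--     Returns:
--         Best matching download or None if no match found
--     """
--     if prefer_focal:
--         for download in downloads:
--             if (download.get('channel') == 'focal' and
--                 (download.get('architecture') == system_arch or download.get('architecture') == 'all')):
--                 return download
--
--     for download in downloads:
--         if download.get('architecture') == system_arch or download.get('architecture') == 'all':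
--             return download
--
--     return None
-- ===== SOURCE B (Python) =====
-- def find_compatible_download(downloads, system_arch, prefer_focal=True):
--     fallback = None
--     for download in downloads:
--         arch = download.get('architecture')
--         if arch != system_arch and arch != 'all':
--             continue
--         if prefer_focal and download.get('channel') == 'focal':
--             return download
--         if fallback is None:
--             fallback = download
--     return fallback
-- ===== Notes on version B (the rewrite author's own statement) =====
-- stated objective: simpler
-- what changed: Replaced A's two sequential scans (focal pass, then generic pass) by a single pass that returns a focal match immediately and remembers the first arch-compatible download as a fallback.
import Mathlib
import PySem

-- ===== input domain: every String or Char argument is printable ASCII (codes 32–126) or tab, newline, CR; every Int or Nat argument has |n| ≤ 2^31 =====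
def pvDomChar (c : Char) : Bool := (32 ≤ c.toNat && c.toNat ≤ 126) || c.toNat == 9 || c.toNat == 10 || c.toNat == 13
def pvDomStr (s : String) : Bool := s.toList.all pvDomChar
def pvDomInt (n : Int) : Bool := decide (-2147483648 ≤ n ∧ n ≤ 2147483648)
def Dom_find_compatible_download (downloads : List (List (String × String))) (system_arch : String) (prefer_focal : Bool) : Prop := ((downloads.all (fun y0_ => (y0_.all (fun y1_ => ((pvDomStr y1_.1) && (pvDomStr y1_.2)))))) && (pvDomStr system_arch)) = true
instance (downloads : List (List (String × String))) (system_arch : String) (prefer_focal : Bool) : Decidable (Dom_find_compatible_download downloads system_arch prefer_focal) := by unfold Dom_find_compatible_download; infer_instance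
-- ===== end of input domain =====

-- B fuses A's two sequential scans into one pass with a remembered fallback; objective: simpler.
-- ===== PORT A =====
-- download.get(k): first-match lookup in the association list (exact for a Python dict)
def fcdGet (d : List (String × String)) (k : String) : Option String := d.lookup k

-- first loop of A: first download whose channel is 'focal' and whose architecture is compatible
def fcdFocalPass (system_arch : String) : List (List (String × String)) → Option (List (String × String))
  | [] => none
  | d :: rest =>
    if (fcdGet d "channel" == some "focal") &&
       (fcdGet d "architecture" == some system_arch || fcdGet d "architecture" == some "all") then
      some d
    else fcdFocalPass system_arch rest

-- second loop of A: first download whose architecture is compatible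
def fcdArchPass (system_arch : String) : List (List (String × String)) → Option (List (String × String))
  | [] => none
  | d :: rest =>
    if fcdGet d "architecture" == some system_arch || fcdGet d "architecture" == some "all" then
      some d
    else fcdArchPass system_arch rest

def find_compatible_download (downloads : List (List (String × String))) (system_arch : String) (prefer_focal : Bool) : Option (List (String × String)) :=
  if prefer_focal then
    match fcdFocalPass system_arch downloads with
    | some d => some d
    | none => fcdArchPass system_arch downloads
  else fcdArchPass system_arch downloads

-- ===== PORT B =====
-- B's single loop, carrying the fallback variable
def fcdLoop (system_arch : String) (prefer_focal : Bool) :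
    List (List (String × String)) → Option (List (String × String)) → Option (List (String × String))
  | [], fallback => fallback
  | d :: rest, fallback =>
    let arch := fcdGet d "architecture"
    if !(arch == some system_arch) && !(arch == some "all") then
      fcdLoop system_arch prefer_focal rest fallback
    else if prefer_focal && (fcdGet d "channel" == some "focal") then
      some d
    else
      fcdLoop system_arch prefer_focal rest (if fallback.isNone then some d else fallback)

def find_compatible_download_alt (downloads : List (List (String × String))) (system_arch : String) (prefer_focal : Bool) : Option (List (String × String)) :=
  fcdLoop system_arch prefer_focal downloads none

-- ===== PRECONDITION & SPEC =====
def Spec_find_compatible_download (downloads : List (List (String × String))) (system_arch : String) (prefer_focal : Bool) (out : Option (List (String × String))) : Prop := out = find_compatible_download_alt downloads system_arch prefer_focal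
instance (downloads : List (List (String × String))) (system_arch : String) (prefer_focal : Bool) (out : Option (List (String × String))) : Decidable (Spec_find_compatible_download downloads system_arch prefer_focal out) := by unfold Spec_find_compatible_download; infer_instance

-- ===== CLAIM (what is proved, stated in full; the proofs are below) =====
def Claim_equal_find_compatible_download : Prop := ∀ (downloads : List (List (String × String))) (system_arch : String) (prefer_focal : Bool), Dom_find_compatible_download downloads system_arch prefer_focal → Spec_find_compatible_download downloads system_arch prefer_focal (find_compatible_download downloads system_arch prefer_focal)

-- ===== LEMMAS AND PROOFS =====

-- ===== VERDICT (by name: the statement is the Claim_ definition above) =====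
-- loop invariant: B's single pass with fallback fb equals A's two-pass result, with fb
-- taking priority over the second pass (fb is always the first compatible element already seen)
theorem fcdLoop_eq (system_arch : String) (prefer_focal : Bool) :
    ∀ (dl : List (List (String × String))) (fb : Option (List (String × String))),
      fcdLoop system_arch prefer_focal dl fb =
        if prefer_focal then
          match fcdFocalPass system_arch dl with
          | some d => some d
          | none => fb.or (fcdArchPass system_arch dl)
        else fb.or (fcdArchPass system_arch dl) := by
  intro dl
  induction dl with
  | nil => intro fb; cases prefer_focal <;> simp [fcdLoop, fcdFocalPass, fcdArchPass]
  | cons d rest ih =>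
    intro fb
    cases ha : (fcdGet d "architecture" == some system_arch) with
    | true =>
      cases prefer_focal with
      | true =>
        cases hch : (fcdGet d "channel" == some "focal") with
        | true => simp [fcdLoop, fcdFocalPass, ha, hch]
        | false =>
          cases fb <;> cases hfp : fcdFocalPass system_arch rest <;>
            simp [fcdLoop, fcdFocalPass, fcdArchPass, ha, hch, hfp, ih, Option.or]
      | false => cases fb <;> simp [fcdLoop, fcdArchPass, ha, ih, Option.or]
    | false =>
      cases ha2 : (fcdGet d "architecture" == some "all") with
      | true =>
        cases prefer_focal with
        | true =>
          cases hch : (fcdGet d "channel" == some "focal") with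
          | true => simp [fcdLoop, fcdFocalPass, ha, ha2, hch]
          | false =>
            cases fb <;> cases hfp : fcdFocalPass system_arch rest <;>
              simp [fcdLoop, fcdFocalPass, fcdArchPass, ha, ha2, hch, hfp, ih, Option.or]
        | false => cases fb <;> simp [fcdLoop, fcdArchPass, ha, ha2, ih, Option.or]
      | false =>
        cases prefer_focal <;> simp [fcdLoop, fcdFocalPass, fcdArchPass, ha, ha2, ih]

theorem find_compatible_download_spec : Claim_equal_find_compatible_download := by
  intro downloads system_arch prefer_focal _
  unfold Spec_find_compatible_download find_compatible_download find_compatible_download_alt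
  rw [fcdLoop_eq]
  cases prefer_focal with
  | false => simp [Option.or]
  | true => simp only [if_true]; cases fcdFocalPass system_arch downloads <;> simp [Option.or]
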